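-- pv_equiv track=rewrite | github.com/pypi-data/pypi-mirror-286 | packages/podcast-transcript-convert/podcast_transcript_convert-0.1.2-py3-none-any.whl/podcast_transcript_convert/file_typing.py | _extract_file_types_from_name
-- ===== SOURCE A (Python) =====
-- from collections.abc import Iterable
-- from enum import StrEnum, auto
-- from typing import NamedTuple
--
-- class FileType(StrEnum):
--     HTML = auto()
--     JSON = auto()
--     SRT = auto()
--     VTT = auto()
--     XML = auto()
--     UNKNOWN = auto()
--
-- _extension_to_type = {
--     "vtt": FileType.VTT,
--     "srt": FileType.SRT,
--     "htm": FileType.HTML,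
--     "html": FileType.HTML,
--     "json": FileType.JSON,
--     "xml": FileType.XML,
--     "xsl": FileType.XML,
-- }
--
-- class TypedFileLists(NamedTuple):
--     """html_files, json_files, srt_files, vtt_files, xml_files, unknown_files."""
--
--     html_files: list[str]
--     json_files: list[str]
--     srt_files: list[str]
--     vtt_files: list[str]
--     xml_files: list[str]
--     unknown_files: list[str]
--
-- def _extract_file_type_from_name(file_path: str) -> FileType:
--     extension = file_path.split(".")[-1]
--     return _extension_to_type.get(extension, FileType.UNKNOWN)
--
-- def _extract_file_types_from_name(
--     file_paths: Iterable[str],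
-- ) -> TypedFileLists:
--     srt_files = []
--     vtt_files = []
--     html_files = []
--     json_files = []
--     xml_files = []
--     unknown_files = []
--
--     for file_path in file_paths:
--         match _extract_file_type_from_name(file_path):
--             case FileType.VTT:
--                 vtt_files.append(file_path)
--             case FileType.SRT:
--                 srt_files.append(file_path)
--             case FileType.HTML:
--                 html_files.append(file_path)
--             case FileType.JSON:
--                 json_files.append(file_path)
--             case FileType.XML:
--                 xml_files.append(file_path)
--             case FileType.UNKNOWN:
--                 unknown_files.append(file_path)
--
--     return TypedFileLists(
--         html_files,
--         json_files,
--         srt_files,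
--         vtt_files,
--         xml_files,
--         unknown_files,
--     )
-- ===== SOURCE B (Python) =====
-- from collections.abc import Iterable
-- from enum import StrEnum, auto
-- from typing import NamedTuple
--
-- class FileType(StrEnum):
--     HTML = auto()
--     JSON = auto()
--     SRT = auto()
--     VTT = auto()
--     XML = auto()
--     UNKNOWN = auto()
--
-- _extension_to_type = {
--     "vtt": FileType.VTT,
--     "srt": FileType.SRT,
--     "htm": FileType.HTML,
--     "html": FileType.HTML,
--     "json": FileType.JSON,
--     "xml": FileType.XML,
--     "xsl": FileType.XML,
-- }
--
-- class TypedFileLists(NamedTuple):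
--     html_files: list[str]
--     json_files: list[str]
--     srt_files: list[str]
--     vtt_files: list[str]
--     xml_files: list[str]
--     unknown_files: list[str]
--
-- def _extract_file_type_from_name(file_path: str) -> FileType:
--     extension = file_path.split(".")[-1]
--     return _extension_to_type.get(extension, FileType.UNKNOWN)
--
-- def _extract_file_types_from_name(file_paths: Iterable[str]) -> TypedFileLists:
--     files = list(file_paths)
--     return TypedFileLists(*(
--         [p for p in files if _extract_file_type_from_name(p) is ft]
--         for ft in (FileType.HTML, FileType.JSON, FileType.SRT,
--                    FileType.VTT, FileType.XML, FileType.UNKNOWN)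
--     ))
-- ===== Notes on version B (the rewrite author's own statement) =====
-- stated objective: simpler
-- what changed: Replaces the six mutable accumulators and the six-way match inside one loop by six order-preserving filter comprehensions, one per file type.
import Mathlib
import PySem

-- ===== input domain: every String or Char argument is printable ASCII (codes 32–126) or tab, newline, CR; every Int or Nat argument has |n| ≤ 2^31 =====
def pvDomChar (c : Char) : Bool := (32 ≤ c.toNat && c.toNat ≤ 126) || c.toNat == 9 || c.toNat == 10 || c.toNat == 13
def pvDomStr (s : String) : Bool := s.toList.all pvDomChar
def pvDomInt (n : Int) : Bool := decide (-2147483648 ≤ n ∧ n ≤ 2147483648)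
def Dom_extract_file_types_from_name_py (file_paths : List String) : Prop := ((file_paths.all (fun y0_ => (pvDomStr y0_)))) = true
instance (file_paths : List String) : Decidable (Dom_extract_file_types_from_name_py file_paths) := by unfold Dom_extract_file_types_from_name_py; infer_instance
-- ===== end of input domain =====

-- B replaces the six mutable accumulators and the six-way match inside one loop
-- by six order-preserving filters, one per file type (objective: simpler).


-- ===== PORT A =====
-- FileType enum (shared by both ports, as in the Python module)
inductive PvFileType where
  | html | json | srt | vtt | xml | unknown
deriving DecidableEq, Repr

-- _extract_file_type_from_name: split on ".", take the last piece, look it up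
def pvFileTypeOf (file_path : String) : PvFileType :=
  let ext := ((PySem.Str.split? file_path ".").getD []).getLastD ""   -- sep ≠ "" so split? = some; split(".") is never empty, so [-1] = last
  if ext = "vtt" then .vtt
  else if ext = "srt" then .srt
  else if ext = "htm" then .html
  else if ext = "html" then .html
  else if ext = "json" then .json
  else if ext = "xml" then .xml
  else if ext = "xsl" then .xml
  else .unknown

-- the loop body of A: append file_path to the matching bucket
def pvStepA (st : List String × List String × List String × List String × List String × List String)
    (p : String) : List String × List String × List String × List String × List String × List String :=
  match st with
  | (h, j, s, v, x, u) =>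
    match pvFileTypeOf p with
    | .vtt => (h, j, s, v ++ [p], x, u)
    | .srt => (h, j, s ++ [p], v, x, u)
    | .html => (h ++ [p], j, s, v, x, u)
    | .json => (h, j ++ [p], s, v, x, u)
    | .xml => (h, j, s, v, x ++ [p], u)
    | .unknown => (h, j, s, v, x, u ++ [p])

def extract_file_types_from_name_py (file_paths : List String) : List String × List String × List String × List String × List String × List String :=
  file_paths.foldl pvStepA ([], [], [], [], [], [])

-- ===== PORT B =====
def extract_file_types_from_name_py_alt (file_paths : List String) : List String × List String × List String × List String × List String × List String :=
  (file_paths.filter (fun p => pvFileTypeOf p = .html),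
   file_paths.filter (fun p => pvFileTypeOf p = .json),
   file_paths.filter (fun p => pvFileTypeOf p = .srt),
   file_paths.filter (fun p => pvFileTypeOf p = .vtt),
   file_paths.filter (fun p => pvFileTypeOf p = .xml),
   file_paths.filter (fun p => pvFileTypeOf p = .unknown))

-- ===== PRECONDITION & SPEC =====
def Spec_extract_file_types_from_name_py (file_paths : List String) (out : List String × List String × List String × List String × List String × List String) : Prop := out = extract_file_types_from_name_py_alt file_paths
instance (file_paths : List String) (out : List String × List String × List String × List String × List String × List String) : Decidable (Spec_extract_file_types_from_name_py file_paths out) := by unfold Spec_extract_file_types_from_name_py; infer_instance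

-- ===== CLAIM (what is proved, stated in full; the proofs are below) =====
def Claim_equal_extract_file_types_from_name_py : Prop := ∀ (file_paths : List String), Dom_extract_file_types_from_name_py file_paths → Spec_extract_file_types_from_name_py file_paths (extract_file_types_from_name_py file_paths)

-- ===== LEMMAS AND PROOFS =====
-- loop invariant: folding A's step from any accumulators appends the six filters
theorem pvFoldA_eq (l : List String)
    (h j s v x u : List String) :
    l.foldl pvStepA (h, j, s, v, x, u) =
      (h ++ l.filter (fun p => pvFileTypeOf p = .html),
       j ++ l.filter (fun p => pvFileTypeOf p = .json),
       s ++ l.filter (fun p => pvFileTypeOf p = .srt),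
       v ++ l.filter (fun p => pvFileTypeOf p = .vtt),
       x ++ l.filter (fun p => pvFileTypeOf p = .xml),
       u ++ l.filter (fun p => pvFileTypeOf p = .unknown)) := by
  induction l generalizing h j s v x u with
  | nil => simp
  | cons a t ih =>
    simp only [List.foldl_cons, List.filter_cons]
    cases hc : pvFileTypeOf a <;>
      simp [pvStepA, hc, ih, List.append_assoc]

-- ===== VERDICT (by name: the statement is the Claim_ definition above) =====
theorem extract_file_types_from_name_py_spec : Claim_equal_extract_file_types_from_name_py := by
  intro file_paths _
  show _ = _
  simp [extract_file_types_from_name_py, extract_file_types_from_name_py_alt, pvFoldA_eq]
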